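-- pv_equiv track=rewrite | github.com/njbergam/dhlab | test.py | sentenceLength
-- ===== SOURCE A (Python) =====
-- def sentenceLength(array):
-- 	lens = []
-- 	senlen = 0
-- 	for word in array:
-- 		if word == ".":
-- 			lens.append(senlen)
-- 			senlen = 0
-- 		else:
-- 			senlen += 1
-- 	return lens
-- ===== SOURCE B (Python) =====
-- def sentenceLength(array):
--     segments = []
--     current = []
--     for word in array:
--         if word == ".":
--             segments.append(current)
--             current = []
--         else:
--             current.append(word)
--     segments.append(current)
--     return [len(seg) for seg in segments[:-1]]
-- ===== Notes on version B (the rewrite author's own statement) =====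
-- stated objective: alternative
-- what changed: B partitions the list into word-segments separated by '.' and takes lengths of all but the trailing never-terminated segment, instead of A's single running integer counter.
import Mathlib
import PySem

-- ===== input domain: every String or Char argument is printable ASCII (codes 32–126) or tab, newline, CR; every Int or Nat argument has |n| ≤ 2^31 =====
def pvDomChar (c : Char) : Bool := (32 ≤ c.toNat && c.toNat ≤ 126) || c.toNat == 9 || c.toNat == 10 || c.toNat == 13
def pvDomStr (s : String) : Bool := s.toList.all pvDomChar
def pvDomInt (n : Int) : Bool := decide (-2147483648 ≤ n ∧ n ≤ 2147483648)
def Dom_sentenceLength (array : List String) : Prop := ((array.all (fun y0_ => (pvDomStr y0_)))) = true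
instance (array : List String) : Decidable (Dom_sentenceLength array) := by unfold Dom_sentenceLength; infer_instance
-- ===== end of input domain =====

-- B keeps a list of word-segments instead of A's running counter; same O(n) cost (objective: alternative).

-- ===== PORT A =====
-- loop over the words with accumulators lens, senlen
def sentenceLengthGoA : List String → List Int → Int → List Int
  | [], lens, _ => lens
  | w :: ws, lens, senlen =>
    if w == "." then sentenceLengthGoA ws (lens ++ [senlen]) 0
    else sentenceLengthGoA ws lens (senlen + 1)

def sentenceLength (array : List String) : List Int :=
  sentenceLengthGoA array [] 0

-- ===== PORT B =====
-- build the list of segments (lists of words), then lengths of all but the last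
def sentenceLengthGoB : List String → List (List String) → List String → List (List String)
  | [], segs, cur => segs ++ [cur]
  | w :: ws, segs, cur =>
    if w == "." then sentenceLengthGoB ws (segs ++ [cur]) []
    else sentenceLengthGoB ws segs (cur ++ [w])

def sentenceLength_alt (array : List String) : List Int :=
  ((sentenceLengthGoB array [] []).dropLast).map (fun seg => (seg.length : Int))

-- ===== PRECONDITION & SPEC =====
def Spec_sentenceLength (array : List String) (out : List Int) : Prop := out = sentenceLength_alt array
instance (array : List String) (out : List Int) : Decidable (Spec_sentenceLength array out) := by unfold Spec_sentenceLength; infer_instance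

-- ===== CLAIM (what is proved, stated in full; the proofs are below) =====
def Claim_equal_sentenceLength : Prop := ∀ (array : List String), Dom_sentenceLength array → Spec_sentenceLength array (sentenceLength array)

-- ===== LEMMAS AND PROOFS =====
theorem sentenceLengthGo_eq (ws : List String) :
    ∀ (segs : List (List String)) (cur : List String),
      ((sentenceLengthGoB ws segs cur).dropLast).map (fun seg => (seg.length : Int))
        = sentenceLengthGoA ws (segs.map (fun seg => (seg.length : Int))) (cur.length : Int) := by
  induction ws with
  | nil =>
    intro segs cur
    simp [sentenceLengthGoA, sentenceLengthGoB]
  | cons w ws ih =>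
    intro segs cur
    by_cases h : w == "."
    · simp only [sentenceLengthGoA, sentenceLengthGoB, h, if_true]
      rw [ih]
      simp
    · simp only [sentenceLengthGoA, sentenceLengthGoB, h, Bool.false_eq_true, if_false]
      rw [ih]
      simp

-- ===== VERDICT (by name: the statement is the Claim_ definition above) =====
theorem sentenceLength_spec : Claim_equal_sentenceLength := by
  intro array _
  unfold Spec_sentenceLength sentenceLength sentenceLength_alt
  have h := sentenceLengthGo_eq array [] []
  simpa using h.symm
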